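-- pv_equiv track=rewrite | github.com/unthingable/ripcord | benchmark/scripts/ami_build_stereo.py | mix_channels
-- ===== SOURCE A (Python) =====
-- def mix_channels(channels):
--     """Mix multiple mono channels by averaging, with clipping to int16 range."""
--     if not channels:
--         return []
--     n = min(len(c) for c in channels)
--     count = len(channels)
--     mixed = []
--     for i in range(n):
--         s = sum(c[i] for c in channels) // count
--         mixed.append(max(-32768, min(32767, s)))
--     return mixed
-- ===== SOURCE B (Python) =====
-- def mix_channels(channels):
--     """Mix multiple mono channels by averaging, with clipping to int16 range."""
--     if not channels:
--         return []
--     count = len(channels)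
--     acc = channels[0]
--     for c in channels[1:]:
--         acc = [a + x for a, x in zip(acc, c)]
--     return [max(-32768, min(32767, s // count)) for s in acc]
-- ===== Notes on version B (the rewrite author's own statement) =====
-- stated objective: simpler
-- what changed: Channel-major pairwise zip-accumulation (zip truncation supplies the min length, so no index arithmetic and no explicit n) replaces A's sample-major loop that re-scans all channels with a generator expression per index.
import Mathlib
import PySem

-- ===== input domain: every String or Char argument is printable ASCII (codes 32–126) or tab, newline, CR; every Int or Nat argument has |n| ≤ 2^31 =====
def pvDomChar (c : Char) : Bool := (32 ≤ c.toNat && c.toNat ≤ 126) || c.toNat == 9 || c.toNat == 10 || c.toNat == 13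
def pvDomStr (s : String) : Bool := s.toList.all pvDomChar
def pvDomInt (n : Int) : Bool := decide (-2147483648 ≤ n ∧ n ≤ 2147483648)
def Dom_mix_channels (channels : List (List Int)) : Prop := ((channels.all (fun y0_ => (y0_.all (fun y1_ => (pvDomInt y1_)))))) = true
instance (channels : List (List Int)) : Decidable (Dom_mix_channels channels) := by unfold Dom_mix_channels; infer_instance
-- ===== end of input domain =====

-- B mixes channel-major with pairwise zip-accumulation (zip truncation supplies the
-- min length) instead of A's sample-major per-index rescan of all channels; simpler.


-- ===== PORT A =====
-- c[i] is ported as getD i 0: every index drawn from range n with n = min length is in range.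
def mix_channels (channels : List (List Int)) : List Int :=
  match channels with
  | [] => []
  | c0 :: rest =>
    let n : Nat := rest.foldl (fun m c => min m c.length) c0.length
    let count : Int := ((c0 :: rest).length : Int)
    (List.range n).foldl
      (fun mixed i =>
        let s : Int :=
          PySem.Int.floordiv ((c0 :: rest).foldl (fun a c => a + c.getD i 0) 0) count
        mixed ++ [max (-32768) (min 32767 s)]) []

-- ===== PORT B =====
def mix_channels_alt (channels : List (List Int)) : List Int :=
  match channels with
  | [] => []
  | c0 :: rest =>
    let count : Int := ((c0 :: rest).length : Int)
    let acc := rest.foldl (fun a c => List.zipWith (· + ·) a c) c0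
    acc.map (fun s => max (-32768) (min 32767 (PySem.Int.floordiv s count)))

-- ===== PRECONDITION & SPEC =====
def Spec_mix_channels (channels : List (List Int)) (out : List Int) : Prop := out = mix_channels_alt channels
instance (channels : List (List Int)) (out : List Int) : Decidable (Spec_mix_channels channels out) := by unfold Spec_mix_channels; infer_instance

-- ===== CLAIM (what is proved, stated in full; the proofs are below) =====
def Claim_equal_mix_channels : Prop := ∀ (channels : List (List Int)), Dom_mix_channels channels → Spec_mix_channels channels (mix_channels channels)

-- ===== LEMMAS AND PROOFS =====

theorem pv_foldl_append_map (l : List Nat) (f : Nat → Int) (acc : List Int) :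
    l.foldl (fun m i => m ++ [f i]) acc = acc ++ l.map f := by
  induction l generalizing acc with
  | nil => simp
  | cons x t ih => simp [List.foldl_cons, ih]

theorem pv_zw_length (rest : List (List Int)) (c0 : List Int) :
    (rest.foldl (fun a c => List.zipWith (· + ·) a c) c0).length
      = rest.foldl (fun m c => min m c.length) c0.length := by
  induction rest generalizing c0 with
  | nil => rfl
  | cons c t ih => simp [List.foldl_cons, ih, List.length_zipWith]

theorem pv_foldl_min_le (rest : List (List Int)) (m : Nat) :
    rest.foldl (fun m c => min m c.length) m ≤ m := by
  induction rest generalizing m with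
  | nil => simp
  | cons c t ih =>
    simp only [List.foldl_cons]
    exact le_trans (ih _) (min_le_left _ _)

theorem pv_zw_getD (rest : List (List Int)) (c0 : List Int) (i : Nat)
    (hi : i < (rest.foldl (fun a c => List.zipWith (· + ·) a c) c0).length) :
    (rest.foldl (fun a c => List.zipWith (· + ·) a c) c0).getD i 0
      = rest.foldl (fun s c => s + c.getD i 0) (c0.getD i 0) := by
  induction rest generalizing c0 with
  | nil => rfl
  | cons c t ih =>
    simp only [List.foldl_cons] at hi ⊢
    rw [ih _ hi]
    have hz : i < (List.zipWith (· + ·) c0 c).length := by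
      have hle : (t.foldl (fun a c => List.zipWith (· + ·) a c)
          (List.zipWith (· + ·) c0 c)).length ≤ (List.zipWith (· + ·) c0 c).length := by
        rw [pv_zw_length]
        exact pv_foldl_min_le t _
      exact lt_of_lt_of_le hi hle
    have h0 : i < c0.length := lt_of_lt_of_le hz (by simp [List.length_zipWith])
    have hc : i < c.length := lt_of_lt_of_le hz (by simp [List.length_zipWith])
    rw [List.getD_eq_getElem _ _ hz, List.getD_eq_getElem _ _ h0, List.getD_eq_getElem _ _ hc,
      List.getElem_zipWith]

-- ===== VERDICT (by name: the statement is the Claim_ definition above) =====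
theorem mix_channels_spec : Claim_equal_mix_channels := by
  intro channels _dom
  unfold Spec_mix_channels
  cases channels with
  | nil => rfl
  | cons c0 rest =>
    simp only [mix_channels, mix_channels_alt]
    rw [pv_foldl_append_map]
    apply List.ext_getElem
    · simp [pv_zw_length]
    · intro i h1 h2
      simp only [List.nil_append, List.getElem_map, List.getElem_range]
      have hlen : i < (rest.foldl (fun a c => List.zipWith (· + ·) a c) c0).length := by
        simpa using h2
      rw [← List.getD_eq_getElem _ 0 hlen, pv_zw_getD rest c0 i hlen]
      simp [List.foldl_cons]
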